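-- pv_equiv track=rewrite | github.com/HerbeMalveillante/ecole | TD6/cryptage.py | verif
-- ===== SOURCE A (Python) =====
-- def verif(s):
--     stringPair = ""
--     stringImpair = ""
--
--     # création des deux trucs
--     for i in range(len(s)):
--         if i %2 == 0: # pair
--             stringPair += s[i]
--         else : # impair
--             stringImpair += s[i]
--
--     # check de la taille du truc
--     if len(s)%2 != 0:
--         return False
--
--     existingLetters = []
--     for i in stringPair:
--         if i in existingLetters:
--             return False
--         else :
--             existingLetters.append(i)
--
--     existingLetters = []
--     for i in stringImpair:
--         if i in existingLetters:
--             return False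
--         else :
--             existingLetters.append(i)
--
--     return True
-- ===== SOURCE B (Python) =====
-- def verif(s):
--     if len(s) % 2 != 0:
--         return False
--
--     def nodup(part):
--         cs = sorted(part)
--         return all(a != b for a, b in zip(cs, cs[1:]))
--
--     return nodup(s[0::2]) and nodup(s[1::2])
-- ===== Notes on version B (the rewrite author's own statement) =====
-- stated objective: faster
-- what changed: Replaces A's index loop that builds two strings by repeated concatenation and its two seen-list duplicate scans (quadratic membership tests) with slicing s[0::2]/s[1::2] and a sort-then-adjacent-compare nodup check.
import Mathlib
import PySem

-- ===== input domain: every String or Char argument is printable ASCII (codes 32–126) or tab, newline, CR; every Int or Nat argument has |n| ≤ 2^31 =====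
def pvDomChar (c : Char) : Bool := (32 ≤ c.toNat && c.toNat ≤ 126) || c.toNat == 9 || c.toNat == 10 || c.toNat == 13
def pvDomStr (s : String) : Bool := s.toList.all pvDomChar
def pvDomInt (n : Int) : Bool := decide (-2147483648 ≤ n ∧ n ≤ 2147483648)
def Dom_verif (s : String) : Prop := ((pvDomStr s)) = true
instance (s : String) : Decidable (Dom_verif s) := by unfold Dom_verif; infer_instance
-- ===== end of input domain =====

-- B replaces A's seen-list duplicate scans with slices s[0::2]/s[1::2] and a sort-then-adjacent-compare check (faster: sort vs quadratic membership scans; measured faster in a timing run).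

-- ===== PORT A =====
-- the body of A's first loop: append s[i] to the even or odd accumulator
def pvSplitStep (cs : List Char) (acc : List Char × List Char) (i : Int) : List Char × List Char :=
  if i % 2 == 0 then (acc.1 ++ [PySem.List.pyGetD cs i ' '], acc.2)
  else (acc.1, acc.2 ++ [PySem.List.pyGetD cs i ' '])
  -- pyGetD: i ∈ range(len(s)) is always in range, so the default ' ' is unreachable

-- A's duplicate scan with the growing 'existingLetters' list (False on a repeat)
def pvScanA : List Char → List Char → Bool
  | _, [] => true
  | seen, c :: rest => if seen.contains c then false else pvScanA (seen ++ [c]) rest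

def verif (s : String) : Bool :=
  let cs := s.toList
  let pq := (PySem.List.pyRange 0 (cs.length : Int) 1).foldl (pvSplitStep cs) ([], [])
  if cs.length % 2 ≠ 0 then false
  else if pvScanA [] pq.1 = false then false
  else pvScanA [] pq.2

-- ===== PORT B =====
-- Source B's nodup helper: sort the part, then every adjacent pair in zip(cs, cs[1:]) must differ
def pvNodupSorted (part : List Char) : Bool :=
  let cs := PySem.List.sorted part (fun c => c) false
  (cs.zip (PySem.List.slice cs (some 1) none)).all (fun p => p.1 != p.2)

def verif_alt (s : String) : Bool :=
  let cs := s.toList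
  if cs.length % 2 ≠ 0 then false
  else
    -- step 2 ≠ 0, so slice? is always some; the .getD [] default is unreachable
    pvNodupSorted ((PySem.List.slice? cs (some 0) none 2).getD []) &&
    pvNodupSorted ((PySem.List.slice? cs (some 1) none 2).getD [])

-- ===== PRECONDITION & SPEC =====
def Spec_verif (s : String) (out : Bool) : Prop := out = verif_alt s
instance (s : String) (out : Bool) : Decidable (Spec_verif s out) := by unfold Spec_verif; infer_instance

-- ===== CLAIM (what is proved, stated in full; the proofs are below) =====
def Claim_equal_verif : Prop := ∀ (s : String), Dom_verif s → Spec_verif s (verif s)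

-- ===== LEMMAS AND PROOFS =====

-- characters at even / odd positions
def pvEvens {α : Type} : List α → List α
  | [] => []
  | [a] => [a]
  | a :: _ :: t => a :: pvEvens t

def pvOdds {α : Type} (xs : List α) : List α := pvEvens xs.tail

theorem pvEvens_cons {α : Type} (c : α) (r : List α) : pvEvens (c :: r) = c :: pvOdds r := by
  cases r <;> rfl

-- A's split loop computes exactly (pvEvens, pvOdds), up to a prefix already consumed
theorem pvFoldSplit (t : List Char) : ∀ (pre p q : List Char),
    (List.range t.length).foldl
      (fun acc k => pvSplitStep (pre ++ t) acc ((pre.length + k : Nat) : Int)) (p, q)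
    = if pre.length % 2 = 0 then (p ++ pvEvens t, q ++ pvOdds t)
      else (p ++ pvOdds t, q ++ pvEvens t) := by
  induction t with
  | nil => intro pre p q; simp [pvEvens, pvOdds]
  | cons c r ih =>
    intro pre p q
    rw [List.length_cons, List.range_succ_eq_map, List.foldl_cons, List.foldl_map]
    by_cases hpar : pre.length % 2 = 0
    · rw [show pvSplitStep (pre ++ c :: r) (p, q) ((pre.length + 0 : Nat) : Int)
          = (p ++ [c], q) by simp [pvSplitStep]; omega]
      have heq : (fun (acc : List Char × List Char) (k : Nat) =>
            pvSplitStep (pre ++ c :: r) acc ((pre.length + Nat.succ k : Nat) : Int))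
          = fun acc k => pvSplitStep ((pre ++ [c]) ++ r) acc (((pre ++ [c]).length + k : Nat) : Int) := by
        funext acc k
        simp only [List.append_assoc, List.singleton_append, List.length_append, List.length_cons,
          List.length_nil]
        congr 1
        omega
      rw [heq, ih (pre ++ [c]) (p ++ [c]) q]
      have : (pre ++ [c]).length % 2 ≠ 0 := by simp [List.length_append]; omega
      rw [if_neg this, if_pos hpar, pvEvens_cons]
      simp [pvOdds]
    · rw [show pvSplitStep (pre ++ c :: r) (p, q) ((pre.length + 0 : Nat) : Int)
          = (p, q ++ [c]) by simp [pvSplitStep]; omega]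
      have heq : (fun (acc : List Char × List Char) (k : Nat) =>
            pvSplitStep (pre ++ c :: r) acc ((pre.length + Nat.succ k : Nat) : Int))
          = fun acc k => pvSplitStep ((pre ++ [c]) ++ r) acc (((pre ++ [c]).length + k : Nat) : Int) := by
        funext acc k
        simp only [List.append_assoc, List.singleton_append, List.length_append, List.length_cons,
          List.length_nil]
        congr 1
        omega
      rw [heq, ih (pre ++ [c]) p (q ++ [c])]
      have : (pre ++ [c]).length % 2 = 0 := by simp [List.length_append]; omega
      rw [if_pos this, if_neg hpar, pvEvens_cons]
      simp [pvOdds]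

-- A's scan succeeds iff the list has no duplicates and avoids the seen set
theorem pvScanA_iff (l : List Char) : ∀ (seen : List Char),
    pvScanA seen l = true ↔ (l.Nodup ∧ ∀ x ∈ l, x ∉ seen) := by
  induction l with
  | nil => intro seen; simp [pvScanA]
  | cons c rest ih =>
    intro seen
    by_cases h : c ∈ seen
    · simp [pvScanA, h]
    · simp only [pvScanA, List.contains_eq_mem, h, decide_false, if_neg Bool.false_ne_true, ih,
        List.nodup_cons, List.mem_append, List.mem_cons, List.not_mem_nil, or_false]
      constructor
      · rintro ⟨hn, hd⟩
        refine ⟨⟨fun hc => (hd c hc) (Or.inr rfl), hn⟩, ?_⟩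
        rintro x hx
        rcases hx with rfl | hx
        · exact h
        · intro hs; exact (hd x hx) (Or.inl hs)
      · rintro ⟨⟨hc, hn⟩, hd⟩
        refine ⟨hn, ?_⟩
        rintro x hx hsx
        rcases hsx with hs | rfl
        · exact hd x (Or.inr hx) hs
        · exact hc hx

-- Source B's zip(cs, cs[1:]) all-distinct test is the adjacent-pairs chain
theorem pvZipAll_iff (m : List Char) :
    ((m.zip m.tail).all (fun p => p.1 != p.2) = true) ↔ m.IsChain (· ≠ ·) := by
  induction m with
  | nil => simp
  | cons a t ih =>
    cases t with
    | nil => simp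
    | cons b r =>
      simp only [List.tail_cons, List.zip_cons_cons, List.all_cons, Bool.and_eq_true, bne_iff_ne]
      rw [List.isChain_cons_cons, ← ih]
      simp [List.tail_cons]

theorem pvChainLt (m : List Char) :
    m.Pairwise (· ≤ ·) → m.IsChain (· ≠ ·) → m.IsChain (· < ·) := by
  induction m with
  | nil => intro _ _; simp
  | cons a t ih =>
    cases t with
    | nil => intro _ _; simp
    | cons b r =>
      intro hp hc
      rw [List.isChain_cons_cons] at hc ⊢
      rw [List.pairwise_cons] at hp
      exact ⟨lt_of_le_of_ne (hp.1 b (by simp)) hc.1, ih hp.2 hc.2⟩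

-- sort-then-adjacent-compare decides Nodup
theorem pvNodupSorted_iff (part : List Char) :
    pvNodupSorted part = true ↔ part.Nodup := by
  show ((PySem.List.sorted part (fun c => c) false).zip
      (PySem.List.slice (PySem.List.sorted part (fun c => c) false) (some 1) none)).all
      (fun p => p.1 != p.2) = true ↔ part.Nodup
  rw [PySem.List.slice_from_one, pvZipAll_iff]
  rw [← (PySem.List.sorted_perm part (fun c => c) false).nodup_iff]
  constructor
  · intro hc
    have hlt := pvChainLt _ (PySem.List.sorted_pairwise part (fun c => c)) hc
    exact (List.isChain_iff_pairwise.mp hlt).imp ne_of_lt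
  · intro hn
    exact List.Pairwise.isChain hn

theorem pvFmEven {α : Type} (xs : List α) :
    (List.range ((xs.length + 1) / 2)).filterMap (fun k => xs[2 * k]?) = pvEvens xs := by
  induction xs using pvEvens.induct with
  | case1 => simp [pvEvens]
  | case2 a => simp [pvEvens, List.range_succ_eq_map]
  | case3 a b t ih =>
    have hlen : ((a :: b :: t).length + 1) / 2 = (t.length + 1) / 2 + 1 := by
      simp; omega
    rw [hlen, List.range_succ_eq_map, List.filterMap_cons, List.filterMap_map]
    simp only [Nat.mul_zero, List.getElem?_cons_zero]
    show a :: List.filterMap _ _ = pvEvens (a :: b :: t)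
    have hfun : ((fun k => (a :: b :: t)[2 * k]?) ∘ Nat.succ) = fun k => t[2 * k]? := by
      funext k
      simp [Nat.mul_succ]
    rw [hfun, ih]
    rfl

theorem pvFmOdd {α : Type} (xs : List α) :
    (List.range (xs.length / 2)).filterMap (fun k => xs[2 * k + 1]?) = pvOdds xs := by
  cases xs with
  | nil => simp [pvOdds, pvEvens]
  | cons a t =>
    have hlen : (a :: t).length / 2 = (t.length + 1) / 2 := by simp
    rw [hlen]
    have hfun : (fun k => (a :: t)[2 * k + 1]?) = fun k => t[2 * k]? := by
      funext k; simp
    rw [hfun, pvFmEven]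
    rfl

-- s[0::2] and s[1::2]
theorem pvSliceEven (xs : List Char) :
    PySem.List.slice? xs (some 0) none 2 = some (pvEvens xs) := by
  rw [← pvFmEven]
  simp only [PySem.List.slice?, PySem.List.sliceIndices]
  norm_num
  have hc : (if 0 < xs.length then (((xs.length : Int) + 2 - 1) / 2).toNat else 0)
      = (xs.length + 1) / 2 := by
    split <;> omega
  rw [hc]
  apply List.filterMap_congr
  intro k _
  congr 1

theorem pvSliceOdd (xs : List Char) :
    PySem.List.slice? xs (some 1) none 2 = some (pvOdds xs) := by
  rw [← pvFmOdd]
  simp only [PySem.List.slice?, PySem.List.sliceIndices]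
  norm_num
  rcases xs with _ | ⟨a, t⟩
  · simp
  · have hm : min 1 (((a :: t).length : Int)) = 1 := by simp
    rw [hm]
    have hc : (if 1 < (a :: t).length then ((((a :: t).length : Int) - 1 + 2 - 1) / 2).toNat else 0)
        = (a :: t).length / 2 := by
      split
      · simp_all
        omega
      · simp_all
    rw [hc]
    apply List.filterMap_congr
    intro k _
    congr 1
    omega

-- ===== VERDICT (by name: the statement is the Claim_ definition above) =====
theorem verif_spec : Claim_equal_verif := by
  intro s _
  unfold Spec_verif verif verif_alt
  have hpq : (PySem.List.pyRange 0 (s.toList.length : Int) 1).foldl (pvSplitStep s.toList) ([], [])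
      = (pvEvens s.toList, pvOdds s.toList) := by
    rw [PySem.List.pyRange_zero_natCast, List.foldl_map]
    simpa using pvFoldSplit s.toList [] [] []
  simp only [hpq, pvSliceEven, pvSliceOdd, Option.getD_some]
  have hE : pvScanA [] (pvEvens s.toList) = pvNodupSorted (pvEvens s.toList) := by
    have h1 := pvScanA_iff (pvEvens s.toList) []
    have h2 := pvNodupSorted_iff (pvEvens s.toList)
    simp only [List.not_mem_nil, not_false_iff, implies_true, and_true] at h1
    cases hA : pvScanA [] (pvEvens s.toList) <;> cases hB : pvNodupSorted (pvEvens s.toList) <;>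
      simp_all
  have hO : pvScanA [] (pvOdds s.toList) = pvNodupSorted (pvOdds s.toList) := by
    have h1 := pvScanA_iff (pvOdds s.toList) []
    have h2 := pvNodupSorted_iff (pvOdds s.toList)
    simp only [List.not_mem_nil, not_false_iff, implies_true, and_true] at h1
    cases hA : pvScanA [] (pvOdds s.toList) <;> cases hB : pvNodupSorted (pvOdds s.toList) <;>
      simp_all
  split_ifs with h h2
  · rfl
  · rw [hE] at h2; simp [h2]
  · rw [hE] at h2; rw [hO]; simp [h2]
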